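-- pv_equiv track=rewrite | github.com/h-ram/codeforces | contests/1085/B.py | waterfill
-- ===== SOURCE A (Python) =====
-- def waterfill(state, extra):
--     asc = state[::-1]
--     level = 0
--     length = len(asc)
--
--     while level + 1 < length:
--         need = (asc[level + 1] - asc[level]) * (level + 1)
--         if need > extra:
--             break
--         extra -= need
--         for i in range(level + 1):
--             asc[i] = asc[level + 1]
--         level += 1
--     incrament, remaining = divmod(extra, level + 1)
--     for i in range(level + 1):
--         asc[i] += incrament
--     for i in range(remaining):
--         asc[i] += 1
--     asc.sort()
--     return asc[::-1]
-- ===== SOURCE B (Python) =====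
-- def waterfill(state, extra):
--     asc = state[::-1]
--     n = len(asc)
--     v = asc[0]
--     level = 0
--     while level + 1 < n:
--         need = (asc[level + 1] - v) * (level + 1)
--         if need > extra:
--             break
--         extra -= need
--         v = asc[level + 1]
--         level += 1
--     incr, rem = divmod(extra, level + 1)
--     low = [v + incr + 1] * rem + [v + incr] * (level + 1 - rem)
--     return sorted(low + asc[level + 1:])[::-1]
-- ===== Notes on version B (the rewrite author's own statement) =====
-- stated objective: faster
-- what changed: B tracks the single common water level as a scalar instead of rewriting the filled prefix of the array on every loop step, and builds the final filled prefix once with list repetition, turning A's quadratic copy loops into one linear pass plus a sort; Pre_ excludes the empty list, on which A (and B) raise IndexError.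
import Mathlib
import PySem

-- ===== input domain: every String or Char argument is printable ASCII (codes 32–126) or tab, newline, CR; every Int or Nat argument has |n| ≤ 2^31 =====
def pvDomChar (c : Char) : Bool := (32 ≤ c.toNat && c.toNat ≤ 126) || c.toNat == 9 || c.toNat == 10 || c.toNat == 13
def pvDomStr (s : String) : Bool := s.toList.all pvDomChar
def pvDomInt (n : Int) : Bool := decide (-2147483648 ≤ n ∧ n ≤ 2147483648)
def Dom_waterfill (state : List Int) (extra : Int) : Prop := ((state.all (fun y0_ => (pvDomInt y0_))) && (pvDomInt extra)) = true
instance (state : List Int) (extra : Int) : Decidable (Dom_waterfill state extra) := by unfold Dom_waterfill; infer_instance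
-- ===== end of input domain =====

-- B replaces A's per-step prefix copy loops by a scalar running level (faster, O(n log n) vs O(n^2)); return-value equivalence on non-empty input.

-- ===== PORT A =====
-- foldl over a list of set-indices keeps the length (used by the port's termination proof)
theorem pv_length_foldl_set (is : List Nat) (l : List Int) (w : Int) :
    (is.foldl (fun a i => a.set i w) l).length = l.length := by
  induction is generalizing l with
  | nil => rfl
  | cons i is ih => simp [List.foldl, ih]

-- the while-loop of A: carries the (mutated) array, the level and extra
def waterfillLoopA (asc : List Int) (level : Nat) (extra : Int) : List Int × Nat × Int :=
  if _h : level + 1 < asc.length then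
    let need := (asc.getD (level + 1) 0 - asc.getD level 0) * ((level : Int) + 1)
    if need > extra then (asc, level, extra)
    else
      let w := asc.getD (level + 1) 0
      let asc' := (List.range (level + 1)).foldl (fun a i => a.set i w) asc
      waterfillLoopA asc' (level + 1) (extra - need)
  else (asc, level, extra)
  termination_by asc.length - level
  decreasing_by
    simp only [pv_length_foldl_set]
    omega

def waterfill (state : List Int) (extra : Int) : List Int :=
  let asc := state.reverse
  let r := waterfillLoopA asc 0 extra
  let asc1 := r.1
  let level := r.2.1
  let extra1 := r.2.2
  let incrament := PySem.Int.floordiv extra1 ((level : Int) + 1)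
  let remaining := PySem.Int.mod extra1 ((level : Int) + 1)
  let asc2 := (List.range (level + 1)).foldl (fun a i => a.set i (a.getD i 0 + incrament)) asc1
  let asc3 := (List.range remaining.toNat).foldl (fun a i => a.set i (a.getD i 0 + 1)) asc2
  (PySem.List.sorted asc3 (fun x => x) false).reverse

-- ===== PORT B =====
-- the while-loop of B: the array is read-only, the common level value v is a scalar
def waterfillLoopB (asc : List Int) (v : Int) (level : Nat) (extra : Int) : Int × Nat × Int :=
  if _h : level + 1 < asc.length then
    let need := (asc.getD (level + 1) 0 - v) * ((level : Int) + 1)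
    if need > extra then (v, level, extra)
    else waterfillLoopB asc (asc.getD (level + 1) 0) (level + 1) (extra - need)
  else (v, level, extra)
  termination_by asc.length - level

def waterfill_alt (state : List Int) (extra : Int) : List Int :=
  let asc := state.reverse
  let r := waterfillLoopB asc (asc.headD 0) 0 extra
  let v := r.1
  let level := r.2.1
  let extra1 := r.2.2
  let incr := PySem.Int.floordiv extra1 ((level : Int) + 1)
  let rem := PySem.Int.mod extra1 ((level : Int) + 1)
  let low := List.replicate rem.toNat (v + incr + 1) ++ List.replicate (level + 1 - rem.toNat) (v + incr)
  (PySem.List.sorted (low ++ asc.drop (level + 1)) (fun x => x) false).reverse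

-- ===== PRECONDITION & SPEC =====
-- Pre_ excludes only the empty list, on which A raises IndexError.
def Pre_waterfill (state : List Int) (extra : Int) : Prop := state ≠ []
instance (state : List Int) (extra : Int) : Decidable (Pre_waterfill state extra) := by unfold Pre_waterfill; infer_instance
def pvWitness_waterfill : List Int × Int := ([3, 1], 5)

def Spec_waterfill (state : List Int) (extra : Int) (out : List Int) : Prop := out = waterfill_alt state extra
instance (state : List Int) (extra : Int) (out : List Int) : Decidable (Spec_waterfill state extra out) := by unfold Spec_waterfill; infer_instance

-- ===== CLAIM (what is proved, stated in full; the proofs are below) =====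
def Claim_equal_waterfill : Prop := ∀ (state : List Int) (extra : Int), Dom_waterfill state extra → Pre_waterfill state extra → Spec_waterfill state extra (waterfill state extra)


-- ===== LEMMAS AND PROOFS =====

-- reading at the boundary of a prefix
theorem pv_getD_len (l : List Int) (x : Int) (r : List Int) :
    (l ++ x :: r).getD l.length 0 = x := by
  induction l with
  | nil => rfl
  | cons a l ih => simpa using ih

-- writing at the boundary of a prefix
theorem pv_set_len (l : List Int) (x : Int) (r : List Int) (w : Int) :
    (l ++ x :: r).set l.length w = l ++ w :: r := by
  induction l with
  | nil => rfl
  | cons a l ih => simpa using ih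

-- reading strictly inside a replicate prefix
theorem pv_getD_replicate (k i : Nat) (v : Int) (r : List Int) (h : i < k) :
    (List.replicate k v ++ r).getD i 0 = v := by
  have h1 : i < (List.replicate k v).length := by simpa using h
  rw [List.getD_eq_getElem?_getD, List.getElem?_append_left h1]
  simp [h]

-- A's copy loop on a replicate prefix: overwrite the whole prefix
theorem pv_foldl_set_replicate (k : Nat) (v w : Int) (r : List Int) :
    (List.range k).foldl (fun a i => a.set i w) (List.replicate k v ++ r)
      = List.replicate k w ++ r := by
  induction k generalizing r with
  | zero => rfl
  | succ k ih =>
      rw [List.range_succ, List.foldl_append]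
      have h1 : List.replicate (k + 1) v ++ r = List.replicate k v ++ (v :: r) := by
        simp [List.replicate_succ' (n := k)]
      rw [h1, ih (v :: r)]
      simp only [List.foldl_cons, List.foldl_nil]
      have hs := pv_set_len (List.replicate k w) v r w
      rw [List.length_replicate] at hs
      rw [hs]
      simp [List.replicate_succ' (n := k)]

-- A's increment loop on a replicate prefix: add c to the whole prefix
theorem pv_foldl_add_replicate (k : Nat) (v c : Int) (r : List Int) :
    (List.range k).foldl (fun a i => a.set i (a.getD i 0 + c)) (List.replicate k v ++ r)
      = List.replicate k (v + c) ++ r := by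
  induction k generalizing r with
  | zero => rfl
  | succ k ih =>
      rw [List.range_succ, List.foldl_append]
      have h1 : List.replicate (k + 1) v ++ r = List.replicate k v ++ (v :: r) := by
        simp [List.replicate_succ' (n := k)]
      rw [h1, ih (v :: r)]
      simp only [List.foldl_cons, List.foldl_nil]
      have hg := pv_getD_len (List.replicate k (v + c)) v r
      have hs := pv_set_len (List.replicate k (v + c)) v r (v + c)
      rw [List.length_replicate] at hg hs
      rw [hg, hs]
      simp [List.replicate_succ' (n := k)]

-- A's +1 loop touches only the first k cells of an m-cell replicate prefix
theorem pv_foldl_inc_prefix (k m : Nat) (u : Int) (r : List Int) (hk : k <= m) :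
    (List.range k).foldl (fun a i => a.set i (a.getD i 0 + 1)) (List.replicate m u ++ r)
      = List.replicate k (u + 1) ++ List.replicate (m - k) u ++ r := by
  induction k with
  | zero => simp
  | succ k ih =>
      rw [List.range_succ, List.foldl_append, ih (by omega)]
      simp only [List.foldl_cons, List.foldl_nil]
      have hm : m - k = (m - (k + 1)) + 1 := by omega
      rw [hm, List.replicate_succ, List.append_assoc]
      have hg := pv_getD_len (List.replicate k (u + 1)) u (List.replicate (m - (k + 1)) u ++ r)
      have hs := pv_set_len (List.replicate k (u + 1)) u (List.replicate (m - (k + 1)) u ++ r) (u + 1)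
      rw [List.length_replicate] at hg hs
      simp only [List.cons_append]
      rw [hg, hs]
      simp [List.replicate_succ' (n := k), List.append_assoc]

-- correspondence of the two while-loops: A's array state is always
-- 'replicate (level+1) v' glued to the untouched tail of the original array
theorem pv_loop_corr (orig : List Int) (k : Nat) :
    forall (level : Nat) (extra : Int), orig.length - level = k -> level < orig.length ->
      waterfillLoopA (List.replicate (level + 1) (orig.getD level 0) ++ orig.drop (level + 1)) level extra
        = ((fun r => (List.replicate (r.2.1 + 1) r.1 ++ orig.drop (r.2.1 + 1), r.2.1, r.2.2))
            (waterfillLoopB orig (orig.getD level 0) level extra)) := by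
  induction k using Nat.strong_induction_on with
  | _ k ih =>
    intro level extra hk hlt
    have hlen : (List.replicate (level + 1) (orig.getD level 0) ++ orig.drop (level + 1)).length = orig.length := by
      simp; omega
    rw [waterfillLoopA, waterfillLoopB]
    by_cases hc : level + 1 < orig.length
    · have hcA : level + 1 < (List.replicate (level + 1) (orig.getD level 0) ++ orig.drop (level + 1)).length := by
        rw [hlen]; exact hc
      simp only [hc, hcA, dif_pos]
      -- the two reads agree
      have hdrop : orig.drop (level + 1) = orig.getD (level + 1) 0 :: orig.drop (level + 2) := by
        rw [List.getD_eq_getElem?_getD, List.getElem?_eq_getElem hc]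
        exact List.drop_eq_getElem_cons hc
      have hget1 : (List.replicate (level + 1) (orig.getD level 0) ++ orig.drop (level + 1)).getD (level + 1) 0
          = orig.getD (level + 1) 0 := by
        have hh := pv_getD_len (List.replicate (level + 1) (orig.getD level 0)) (orig.getD (level + 1) 0) (orig.drop (level + 2))
        rw [List.length_replicate] at hh
        rw [hdrop]; exact hh
      have hget0 : (List.replicate (level + 1) (orig.getD level 0) ++ orig.drop (level + 1)).getD level 0
          = orig.getD level 0 := pv_getD_replicate _ _ _ _ (by omega)
      rw [hget1, hget0]
      by_cases hb : (orig.getD (level + 1) 0 - orig.getD level 0) * ((level : Int) + 1) > extra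
      · simp only [if_pos hb]
      · simp only [if_neg hb]
        rw [pv_foldl_set_replicate]
        have hst : List.replicate (level + 1) (orig.getD (level + 1) 0) ++ orig.drop (level + 1)
            = List.replicate (level + 2) (orig.getD (level + 1) 0) ++ orig.drop (level + 2) := by
          rw [hdrop]
          simp [List.replicate_succ' (n := level + 1)]
        rw [hst]
        exact ih (orig.length - (level + 1)) (by omega) (level + 1) _ rfl hc
    · have hcA : ¬ level + 1 < (List.replicate (level + 1) (orig.getD level 0) ++ orig.drop (level + 1)).length := by
        rw [hlen]; exact hc
      simp [hc, hcA]

-- B's loop keeps level below the length of the (non-empty) array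
theorem pv_loopB_level_lt (asc : List Int) (k : Nat) :
    forall (v : Int) (level : Nat) (extra : Int), asc.length - level = k -> level < asc.length ->
      (waterfillLoopB asc v level extra).2.1 < asc.length := by
  induction k using Nat.strong_induction_on with
  | _ k ih =>
    intro v level extra hk hlt
    rw [waterfillLoopB]
    by_cases hc : level + 1 < asc.length
    · simp only [hc, dif_pos]
      by_cases hb : (asc.getD (level + 1) 0 - v) * ((level : Int) + 1) > extra
      · rw [if_pos hb]; exact hlt
      · rw [if_neg hb]
        exact ih (asc.length - (level + 1)) (by omega) _ (level + 1) _ rfl hc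
    · simpa [hc] using hlt

-- ===== VERDICT (by name: the statement is the Claim_ definition above) =====
theorem waterfill_spec : Claim_equal_waterfill := by
  intro state extra _hdom hpre
  unfold Spec_waterfill waterfill waterfill_alt
  obtain ⟨a, t, hor⟩ : ∃ a t, state.reverse = a :: t := by
    cases hh : state.reverse with
    | nil => exact absurd (List.reverse_eq_nil_iff.mp hh) hpre
    | cons a t => exact ⟨a, t, rfl⟩
  rw [hor]
  rcases hrb : waterfillLoopB (a :: t) a 0 extra with ⟨v, level, extra1⟩
  have hlev : level < (a :: t).length := by
    have h := pv_loopB_level_lt (a :: t) ((a :: t).length - 0) a 0 extra rfl (by simp)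
    rw [hrb] at h; exact h
  have hcorr := pv_loop_corr (a :: t) ((a :: t).length - 0) 0 extra rfl (by simp)
  have hg0 : (a :: t).getD 0 0 = a := rfl
  have hrepl : List.replicate 1 a ++ (a :: t).drop 1 = a :: t := rfl
  rw [hg0, hrepl, hrb] at hcorr
  simp only at hcorr
  have hhd : (a :: t).headD 0 = a := rfl
  simp only [hhd, hrb, hcorr]
  have hpos : (0 : Int) < (level : Int) + 1 := by positivity
  have hrem0 : 0 <= PySem.Int.mod extra1 ((level : Int) + 1) := PySem.Int.mod_nonneg _ hpos
  have hremlt : PySem.Int.mod extra1 ((level : Int) + 1) < (level : Int) + 1 := PySem.Int.mod_lt _ hpos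
  have hremNat : (PySem.Int.mod extra1 ((level : Int) + 1)).toNat <= level + 1 := by omega
  rw [pv_foldl_add_replicate, pv_foldl_inc_prefix _ _ _ _ hremNat, List.append_assoc]
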